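-- pv_equiv track=rewrite | github.com/sv0-toolchain/sv0-toolchain | scripts/milestone_orient.py | _find
-- ===== SOURCE A (Python) =====
-- def _normalize_id(raw: str) -> str:
--     s = raw.strip().lower()
--     if s.startswith("m") and len(s) > 1 and s[1].isdigit():
--         return "M" + s[1:]
--     if s.isdigit():
--         return "M" + s
--     return raw.strip()
--
-- def _find(data: dict, needle: str) -> dict | None:
--     milestones = data.get("milestones", [])
--     for m in milestones:
--         if m.get("id", "").lower() == needle.lower():
--             return m
--     norm = _normalize_id(needle)
--     for m in milestones:
--         if m.get("id", "") == norm: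
--             return m
--     return None
-- ===== SOURCE B (Python) =====
-- def _normalize_id(raw: str) -> str:
--     s = raw.strip().lower()
--     if s.startswith("m") and len(s) > 1 and s[1].isdigit():
--         return "M" + s[1:]
--     if s.isdigit():
--         return "M" + s
--     return raw.strip()
--
-- def _find(data: dict, needle: str) -> dict | None:
--     nl = needle.lower()
--     norm = _normalize_id(needle)
--     fallback = None
--     for m in data.get("milestones", []):
--         mid = m.get("id", "")
--         if mid.lower() == nl:
--             return m
--         if fallback is None and mid == norm:
--             fallback = m
--     return fallback
-- ===== Notes on version B (the rewrite author's own statement) =====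
-- stated objective: alternative
-- what changed: The two sequential scans (lowercase match first, then normalized-id match) are merged into one loop that returns immediately on a lowercase match and records the first normalized match in a fallback variable returned after the loop.
import Mathlib
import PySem

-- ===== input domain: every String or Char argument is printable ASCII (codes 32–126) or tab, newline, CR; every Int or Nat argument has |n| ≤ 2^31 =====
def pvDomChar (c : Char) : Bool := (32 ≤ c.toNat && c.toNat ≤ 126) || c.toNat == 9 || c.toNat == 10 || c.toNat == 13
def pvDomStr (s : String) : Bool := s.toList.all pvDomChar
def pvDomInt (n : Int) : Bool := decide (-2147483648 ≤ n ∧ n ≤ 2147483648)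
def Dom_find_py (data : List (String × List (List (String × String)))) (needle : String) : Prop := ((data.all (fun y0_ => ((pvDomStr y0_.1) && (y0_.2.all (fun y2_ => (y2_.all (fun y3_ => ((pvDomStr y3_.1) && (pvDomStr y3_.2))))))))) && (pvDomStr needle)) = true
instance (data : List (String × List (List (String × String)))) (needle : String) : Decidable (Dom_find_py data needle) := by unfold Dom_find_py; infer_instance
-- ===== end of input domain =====

-- B merges A's two sequential scans into a single loop with a fallback accumulator; return values proved equal.

-- shared helpers (the Python helper _normalize_id and dict.get are identical in A and in B)

-- d.get(k, dflt) on an association list: first match, else the default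
def agetD (d : List (String × String)) (k : String) (dflt : String) : String :=
  ((d.find? (fun p => p.1 == k)).map (·.2)).getD dflt

-- data.get("milestones", [])
def milestonesOf (data : List (String × List (List (String × String)))) : List (List (String × String)) :=
  ((data.find? (fun p => p.1 == "milestones")).map (·.2)).getD []

-- port of _normalize_id (exact via PySem.Chars on code points; "M" + s[1:] is 'M' :: s.drop 1)
def normalizeId (raw : String) : String :=
  let s : List Char := PySem.Chars.lower (PySem.Chars.strip raw.toList)
  if PySem.Chars.startswith s ['m'] && decide (1 < s.length)
      && ((s[1]?.map PySem.Chars.isdigit).getD false) then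
    String.ofList ('M' :: s.drop 1)
  else if PySem.Chars.strIsdigit s then
    String.ofList ('M' :: s)
  else
    String.ofList (PySem.Chars.strip raw.toList)

-- ===== PORT A =====
-- first loop of _find: first m with m.get("id","").lower() == needle.lower()
def findLoop1 (ms : List (List (String × String))) (nl : String) : Option (List (String × String)) :=
  match ms with
  | [] => none
  | m :: rest => if PySem.Str.lower (agetD m "id" "") = nl then some m else findLoop1 rest nl

-- second loop of _find: first m with m.get("id","") == norm
def findLoop2 (ms : List (List (String × String))) (norm : String) : Option (List (String × String)) :=
  match ms with
  | [] => none
  | m :: rest => if agetD m "id" "" = norm then some m else findLoop2 rest norm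

def find_py (data : List (String × List (List (String × String)))) (needle : String) : Option (List (String × String)) :=
  let ms := milestonesOf data
  match findLoop1 ms (PySem.Str.lower needle) with
  | some m => some m
  | none => findLoop2 ms (normalizeId needle)

-- ===== PORT B =====
-- single pass: return on lowercase match, keep the first normalized match as fallback
def findLoopB (ms : List (List (String × String))) (nl norm : String)
    (fallback : Option (List (String × String))) : Option (List (String × String)) :=
  match ms with
  | [] => fallback
  | m :: rest =>
    let mid := agetD m "id" ""
    if PySem.Str.lower mid = nl then some m
    else findLoopB rest nl norm (if fallback.isNone && mid == norm then some m else fallback)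

def find_py_alt (data : List (String × List (List (String × String)))) (needle : String) : Option (List (String × String)) :=
  findLoopB (milestonesOf data) (PySem.Str.lower needle) (normalizeId needle) none

-- ===== PRECONDITION & SPEC =====
def Spec_find_py (data : List (String × List (List (String × String)))) (needle : String) (out : Option (List (String × String))) : Prop := out = find_py_alt data needle
instance (data : List (String × List (List (String × String)))) (needle : String) (out : Option (List (String × String))) : Decidable (Spec_find_py data needle out) := by unfold Spec_find_py; infer_instance

-- ===== CLAIM (what is proved, stated in full; the proofs are below) =====
def Claim_equal_find_py : Prop := ∀ (data : List (String × List (List (String × String)))) (needle : String), Dom_find_py data needle → Spec_find_py data needle (find_py data needle)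

-- ===== LEMMAS AND PROOFS =====

-- loop invariant: the one-pass loop equals "first lowercase match, else fallback, else first norm match"
theorem findLoopB_eq (ms : List (List (String × String))) (nl norm : String)
    (fb : Option (List (String × String))) :
    findLoopB ms nl norm fb =
      match findLoop1 ms nl with
      | some m => some m
      | none => fb.or (findLoop2 ms norm) := by
  induction ms generalizing fb with
  | nil => cases fb <;> rfl
  | cons m rest ih =>
    simp only [findLoopB, findLoop1, findLoop2]
    by_cases h1 : PySem.Str.lower (agetD m "id" "") = nl
    · simp [h1]
    · simp only [h1, if_false, ih]
      cases fb with
      | some f => simp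
      | none =>
        by_cases h2 : agetD m "id" "" = norm
        · simp [h2]
        · simp [h2]

-- ===== VERDICT (by name: the statement is the Claim_ definition above) =====
theorem find_py_spec : Claim_equal_find_py := by
  intro data needle _
  show find_py data needle = find_py_alt data needle
  rw [find_py_alt, findLoopB_eq]
  rfl
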